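-- pv_equiv track=rewrite | github.com/too0risk/HackerRank | problem-solving-basic/subarray-sums/sol.py | solution
-- ===== SOURCE A (Python) =====
-- def solution(numbers, queries):
--     if not isinstance(numbers, list) and not isinstance(queries, list):
--         return
--     result = []
--     total = 0
--     for query in queries:
--         if len(query) == 3:
--             start = query[0]
--             end = query[1]
--             additional = query[2]
--             selection = numbers[start-1:end]
--             has_zeros = False
--             for el in selection:
--                 if el == 0:
--                     has_zeros = True
--             total = sum(selection)
--             if has_zeros:
--                 total += additional
--             result.append(total)
--
--     return result
-- ===== SOURCE B (Python) =====
-- def solution(numbers, queries):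
--     # Prefix sums and prefix zero-counts; each query answered by two prefix lookups.
--     n = len(numbers)
--     P = [0]
--     Z = [0]
--     s = 0
--     z = 0
--     for x in numbers:
--         s += x
--         z += 1 if x == 0 else 0
--         P.append(s)
--         Z.append(z)
--
--     def norm(i):
--         if i < 0:
--             i += n
--         return 0 if i < 0 else (n if i > n else i)
--
--     result = []
--     for q in queries:
--         if len(q) == 3:
--             lo = norm(q[0] - 1)
--             hi = norm(q[1])
--             if lo < hi:
--                 total = P[hi] - P[lo]
--                 if Z[hi] > Z[lo]:
--                     total += q[2]
--                 result.append(total)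
--             else:
--                 result.append(0)
--     return result
-- ===== Notes on version B (the rewrite author's own statement) =====
-- stated objective: alternative
-- what changed: B precomputes prefix sums and prefix zero-counts once and answers each query by subtracting two prefix values after slice-bound normalization, instead of materialising and scanning the slice per query.
import Mathlib
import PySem

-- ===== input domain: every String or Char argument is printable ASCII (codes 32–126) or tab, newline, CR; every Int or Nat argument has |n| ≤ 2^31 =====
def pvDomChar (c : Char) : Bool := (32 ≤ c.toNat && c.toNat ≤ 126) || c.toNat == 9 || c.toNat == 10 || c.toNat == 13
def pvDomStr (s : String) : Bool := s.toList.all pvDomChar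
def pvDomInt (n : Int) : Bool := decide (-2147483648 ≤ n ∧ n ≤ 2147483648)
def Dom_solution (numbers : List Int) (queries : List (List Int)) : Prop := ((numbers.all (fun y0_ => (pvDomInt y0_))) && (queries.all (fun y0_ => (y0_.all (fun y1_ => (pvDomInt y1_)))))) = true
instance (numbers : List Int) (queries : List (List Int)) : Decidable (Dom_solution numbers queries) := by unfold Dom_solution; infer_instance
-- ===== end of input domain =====

-- B replaces A's per-query slice materialisation and scan by prefix sums and
-- prefix zero-counts built once, answering each query by two prefix lookups (alternative algorithm).

-- ===== PORT A =====
-- A's per-query loop: slice, scan for zeros, sum; state is (result, total) as in the Python.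
def solution (numbers : List Int) (queries : List (List Int)) : List Int :=
  (queries.foldl (fun (st : List Int × Int) query =>
    if query.length = 3 then
      let start := (PySem.List.pyGet? query 0).getD 0
      let end_ := (PySem.List.pyGet? query 1).getD 0
      let additional := (PySem.List.pyGet? query 2).getD 0
      let selection := PySem.List.slice numbers (some (start - 1)) (some end_)
      let has_zeros := selection.foldl (fun b el => if el = 0 then true else b) false
      let total := selection.sum
      let total := if has_zeros then total + additional else total
      (st.1 ++ [total], total)
    else st) ([], 0)).1

-- ===== PORT B =====
-- Python's slice-bound normalisation as in Source B's `norm`.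
def normIdx (n : Nat) (i : Int) : Int :=
  let i := if i < 0 then i + n else i
  if i < 0 then 0 else if i > (n : Int) then (n : Int) else i

def solution_alt (numbers : List Int) (queries : List (List Int)) : List Int :=
  let n := numbers.length
  let st := numbers.foldl (fun (st : Int × Int × List Int × List Int) x =>
    let s := st.1 + x
    let z := st.2.1 + (if x = 0 then 1 else 0)
    (s, z, st.2.2.1 ++ [s], st.2.2.2 ++ [z])) (0, 0, [0], [0])
  let P := st.2.2.1
  let Z := st.2.2.2
  queries.foldl (fun res q =>
    if q.length = 3 then
      let lo := normIdx n ((PySem.List.pyGet? q 0).getD 0 - 1)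
      let hi := normIdx n ((PySem.List.pyGet? q 1).getD 0)
      if lo < hi then
        let total := (PySem.List.pyGet? P hi).getD 0 - (PySem.List.pyGet? P lo).getD 0
        let total := if (PySem.List.pyGet? Z hi).getD 0 > (PySem.List.pyGet? Z lo).getD 0
          then total + (PySem.List.pyGet? q 2).getD 0 else total
        res ++ [total]
      else res ++ [0]
    else res) []

-- ===== PRECONDITION & SPEC =====
def Spec_solution (numbers : List Int) (queries : List (List Int)) (out : List Int) : Prop := out = solution_alt numbers queries
instance (numbers : List Int) (queries : List (List Int)) (out : List Int) : Decidable (Spec_solution numbers queries out) := by unfold Spec_solution; infer_instance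

-- ===== CLAIM (what is proved, stated in full; the proofs are below) =====
def Claim_equal_solution : Prop := ∀ (numbers : List Int) (queries : List (List Int)), Dom_solution numbers queries → Spec_solution numbers queries (solution numbers queries)

-- ===== LEMMAS AND PROOFS =====

-- cumulative sums of f over a list, starting from s (the tail of a scanl)
def zf : Int → Int := fun x => if x = 0 then (1:Int) else 0

def cums (f : Int → Int) (s : Int) : List Int → List Int
  | [] => []
  | x :: t => (s + f x) :: cums f (s + f x) t

-- the fold in solution_alt builds exactly the prefix lists
theorem fold_state (xs : List Int) (s z : Int) (P Z : List Int) :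
    xs.foldl (fun (st : Int × Int × List Int × List Int) x =>
      let s := st.1 + x
      let z := st.2.1 + (if x = 0 then 1 else 0)
      (s, z, st.2.2.1 ++ [s], st.2.2.2 ++ [z])) (s, z, P, Z)
    = (s + xs.sum, z + (xs.map zf).sum,
       P ++ cums id s xs, Z ++ cums zf z xs) := by
  induction xs generalizing s z P Z with
  | nil => simp [cums]
  | cons x t ih =>
    simp only [List.foldl_cons, ih, cums, List.map_cons, List.sum_cons, id, zf]
    refine Prod.ext ?_ (Prod.ext ?_ (Prod.ext ?_ ?_)) <;> simp <;> ring

theorem cums_get (f : Int → Int) (xs : List Int) :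
    ∀ (k : Nat) (s : Int), k ≤ xs.length →
      (s :: cums f s xs)[k]? = some (s + ((xs.take k).map f).sum) := by
  induction xs with
  | nil => intro k s hk; have hk0 : k = 0 := Nat.le_zero.mp hk; subst hk0; simp
  | cons x t ih =>
    intro k s hk
    cases k with
    | zero => simp
    | succ j =>
      have := ih j (s + f x) (by simpa using hk)
      simp only [cums, List.getElem?_cons_succ, this, List.take_succ_cons, List.map_cons,
        List.sum_cons]
      ring_nf

theorem normIdx_eq (n : Nat) (i : Int) : normIdx n i = ((PySem.List.clampIdx n i : Nat) : Int) := by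
  simp only [normIdx, PySem.List.clampIdx]
  split_ifs <;> omega

theorem hz_fold (sel : List Int) : ∀ b : Bool,
    sel.foldl (fun b el => if el = 0 then true else b) b = (b || decide (0 ∈ sel)) := by
  induction sel with
  | nil => simp
  | cons x t ih =>
    intro b
    by_cases hx : x = 0
    · subst hx
      rw [List.foldl_cons, if_pos rfl, ih]
      simp
    · have h0 : (0 : Int) ≠ x := fun h => hx h.symm
      rw [List.foldl_cons, if_neg hx, ih]
      simp [h0]

theorem zsum_nonneg (l : List Int) :
    0 ≤ (l.map zf).sum := by
  induction l with
  | nil => simp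
  | cons x t ih => by_cases hx : x = 0 <;> simp [zf, hx] <;> omega

theorem zsum_pos_iff (l : List Int) :
    (0 < (l.map zf).sum) ↔ (0 : Int) ∈ l := by
  induction l with
  | nil => simp
  | cons x t ih =>
    by_cases hx : x = 0
    · subst hx; simp [zf]
      have := zsum_nonneg t
      omega
    · have h0 : (0 : Int) ≠ x := fun h => hx h.symm
      simp [zf, hx, ih, h0]

-- splitting a prefix: map-sum over take H = over take L plus over the slice
theorem take_split (f : Int → Int) (xs : List Int) (L H : Nat) (hLH : L ≤ H) :
    ((xs.take H).map f).sum
      = ((xs.take L).map f).sum + ((((xs.drop L)).take (H - L)).map f).sum := by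
  have h : xs.take H = xs.take L ++ (xs.drop L).take (H - L) := by
    conv_lhs => rw [show H = L + (H - L) by omega]
    rw [List.take_add]
  rw [h, List.map_append, List.sum_append]

theorem sum_take_split (xs : List Int) (L H : Nat) (hLH : L ≤ H) :
    (xs.take H).sum = (xs.take L).sum + ((xs.drop L).take (H - L)).sum := by
  simpa using take_split id xs L H hLH


-- A's per-query appended value
def aval (xs q : List Int) : Int :=
  let start := (PySem.List.pyGet? q 0).getD 0
  let end_ := (PySem.List.pyGet? q 1).getD 0
  let additional := (PySem.List.pyGet? q 2).getD 0
  let selection := PySem.List.slice xs (some (start - 1)) (some end_)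
  let has_zeros := selection.foldl (fun b el => if el = 0 then true else b) false
  let total := selection.sum
  if has_zeros then total + additional else total

-- B's per-query appended value, with the prefix lists in scan form
def bval (xs q : List Int) : Int :=
  let P := (0 : Int) :: cums id 0 xs
  let Z := (0 : Int) :: cums zf 0 xs
  let lo := normIdx xs.length ((PySem.List.pyGet? q 0).getD 0 - 1)
  let hi := normIdx xs.length ((PySem.List.pyGet? q 1).getD 0)
  if lo < hi then
    let total := (PySem.List.pyGet? P hi).getD 0 - (PySem.List.pyGet? P lo).getD 0
    if (PySem.List.pyGet? Z hi).getD 0 > (PySem.List.pyGet? Z lo).getD 0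
      then total + (PySem.List.pyGet? q 2).getD 0 else total
  else 0

theorem pref_get (f : Int → Int) (xs : List Int) (k : Nat) (hk : k ≤ xs.length) :
    (PySem.List.pyGet? ((0 : Int) :: cums f 0 xs) ((k : Nat) : Int)).getD 0
      = ((xs.take k).map f).sum := by
  rw [PySem.List.pyGet?_natCast, cums_get f xs k 0 hk]
  simp

theorem per_query (xs q : List Int) : aval xs q = bval xs q := by
  unfold aval bval
  dsimp only
  set q0 := (PySem.List.pyGet? q 0).getD 0 with hq0
  set q1 := (PySem.List.pyGet? q 1).getD 0 with hq1
  set q2 := (PySem.List.pyGet? q 2).getD 0 with hq2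
  set n := xs.length with hn
  set L := PySem.List.clampIdx n (q0 - 1) with hL
  set H := PySem.List.clampIdx n q1 with hH
  have hLn : L ≤ n := PySem.List.clampIdx_le _ _
  have hHn : H ≤ n := PySem.List.clampIdx_le _ _
  have hsel : PySem.List.slice xs (some (q0 - 1)) (some q1) = (xs.drop L).take (H - L) := by
    simp [PySem.List.slice, hL, hH, hn]
  rw [hsel, normIdx_eq, normIdx_eq, ← hL, ← hH]
  by_cases hcmp : L < H
  · have hlt : ((L : Nat) : Int) < ((H : Nat) : Int) := by exact_mod_cast hcmp
    rw [if_pos hlt,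
      pref_get id xs H hHn, pref_get id xs L hLn,
      pref_get zf xs H hHn, pref_get zf xs L hLn]
    simp only [List.map_id]
    set sel := (xs.drop L).take (H - L) with hseldef
    have hid : (xs.take H).sum - (xs.take L).sum = sel.sum := by
      rw [sum_take_split xs L H hcmp.le, hseldef]
      ring
    have hiff : (((xs.take H).map zf).sum > ((xs.take L).map zf).sum) ↔ (0 : Int) ∈ sel := by
      rw [take_split zf xs L H hcmp.le, gt_iff_lt, lt_add_iff_pos_right]
      exact zsum_pos_iff sel
    rw [hz_fold sel false, hid]
    by_cases hmem : (0 : Int) ∈ sel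
    · rw [if_pos (by simpa using hmem), if_pos (hiff.mpr hmem)]
    · rw [if_neg (by simpa using hmem), if_neg (fun h => hmem (hiff.mp h))]
  · have hge : H ≤ L := by omega
    have hnil : (xs.drop L).take (H - L) = ([] : List Int) := by
      have : H - L = 0 := by omega
      simp [this]
    have hlt : ¬ ((L : Nat) : Int) < ((H : Nat) : Int) := by exact_mod_cast hcmp
    rw [if_neg hlt, hnil]
    simp

-- both query folds agree, accumulators generalized
theorem folds_eq (xs : List Int) (queries : List (List Int)) :
    ∀ (res : List Int) (t : Int),
    (queries.foldl (fun (st : List Int × Int) query =>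
      if query.length = 3 then
        let start := (PySem.List.pyGet? query 0).getD 0
        let end_ := (PySem.List.pyGet? query 1).getD 0
        let additional := (PySem.List.pyGet? query 2).getD 0
        let selection := PySem.List.slice xs (some (start - 1)) (some end_)
        let has_zeros := selection.foldl (fun b el => if el = 0 then true else b) false
        let total := selection.sum
        let total := if has_zeros then total + additional else total
        (st.1 ++ [total], total)
      else st) (res, t)).1
    = queries.foldl (fun res q =>
        if q.length = 3 then res ++ [bval xs q] else res) res := by
  induction queries with
  | nil => intro res t; simp
  | cons q qs ih =>
    intro res t
    by_cases hq : q.length = 3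
    · simp only [List.foldl_cons, if_pos hq, ih]
      rw [← per_query]
      rfl
    · simp only [List.foldl_cons, if_neg hq, ih]

theorem altfold_eq (xs : List Int) (qs : List (List Int)) : ∀ res : List Int,
    qs.foldl (fun res q =>
      if q.length = 3 then
        let lo := normIdx xs.length ((PySem.List.pyGet? q 0).getD 0 - 1)
        let hi := normIdx xs.length ((PySem.List.pyGet? q 1).getD 0)
        if lo < hi then
          let total := (PySem.List.pyGet? ((0:Int) :: cums id 0 xs) hi).getD 0
            - (PySem.List.pyGet? ((0:Int) :: cums id 0 xs) lo).getD 0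
          let total := if (PySem.List.pyGet? ((0:Int) :: cums zf 0 xs) hi).getD 0
              > (PySem.List.pyGet? ((0:Int) :: cums zf 0 xs) lo).getD 0
            then total + (PySem.List.pyGet? q 2).getD 0 else total
          res ++ [total]
        else res ++ [0]
      else res) res
    = qs.foldl (fun res q => if q.length = 3 then res ++ [bval xs q] else res) res := by
  induction qs with
  | nil => intro res; rfl
  | cons q t ih =>
    intro res
    rw [List.foldl_cons, List.foldl_cons, ih]
    congr 1
    by_cases hq : q.length = 3
    · rw [if_pos hq, if_pos hq]
      unfold bval
      dsimp only
      split_ifs <;> rfl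
    · rw [if_neg hq, if_neg hq]

-- ===== VERDICT (by name: the statement is the Claim_ definition above) =====
theorem solution_spec : Claim_equal_solution := by
  intro numbers queries _
  unfold Spec_solution solution solution_alt
  dsimp only
  rw [fold_state]
  dsimp only
  simp only [List.singleton_append]
  rw [folds_eq, altfold_eq]
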